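-- pv_equiv track=rewrite | github.com/Atafud/El-Trio-Evolutivo | DilemaPrisionero.py | historia_a_indice
-- ===== SOURCE A (Python) =====
-- def historia_a_indice(historia):
--
--     indice = 0
--     for k, (propia, oponente) in enumerate(historia):
--         if   propia == "A" and oponente == "A": valor = 0
--         elif propia == "A" and oponente == "C": valor = 1
--         elif propia == "C" and oponente == "A": valor = 2
--         else:                                    valor = 3   # CC
--         indice += valor * (4 ** k)
--     return indice
-- ===== SOURCE B (Python) =====
-- _DIGITO = {("A", "A"): 0, ("A", "C"): 1, ("C", "A"): 2}
--
-- def historia_a_indice(historia):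
--     # Horner's method over the reversed history with a table lookup for the
--     # digit (default 3 = the CC / fall-through case): no 4**k powers, no
--     # branch chain.
--     indice = 0
--     for par in reversed(historia):
--         indice = 4 * indice + _DIGITO.get(par, 3)
--     return indice
-- ===== Notes on version B (the rewrite author's own statement) =====
-- stated objective: alternative
-- what changed: Replaces the enumerate loop summing valor*(4**k) terms computed by an if/elif branch chain with Horner's method over reversed(historia), a single multiply-accumulate indice = 4*indice + digit where the digit comes from a precomputed lookup table with default 3 instead of branches.
import Mathlib
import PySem

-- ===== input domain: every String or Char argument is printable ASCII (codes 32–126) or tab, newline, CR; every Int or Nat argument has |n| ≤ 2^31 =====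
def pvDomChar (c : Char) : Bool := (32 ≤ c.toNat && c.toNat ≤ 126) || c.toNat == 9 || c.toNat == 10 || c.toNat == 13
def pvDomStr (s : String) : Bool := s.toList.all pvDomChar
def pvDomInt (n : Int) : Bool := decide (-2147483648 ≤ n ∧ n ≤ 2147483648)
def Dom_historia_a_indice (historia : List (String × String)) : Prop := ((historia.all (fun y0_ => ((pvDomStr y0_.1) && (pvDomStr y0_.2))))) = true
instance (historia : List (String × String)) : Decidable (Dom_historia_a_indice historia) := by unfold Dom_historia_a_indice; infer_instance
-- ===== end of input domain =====

-- B replaces A's sum of branch-chain digits times 4**k by Horner's method over the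
-- reversed history with a lookup-table digit (default 3); alternative decomposition.

-- ===== PORT A =====
-- enumerate index k is ≥ 0, so 4 ** k is ported as 4 ^ k.toNat (exact for k ≥ 0).
def historia_a_indice (historia : List (String × String)) : Int :=
  (PySem.List.enumerate historia 0).foldl
    (fun indice kp =>
      let k := kp.1
      let propia := kp.2.1
      let oponente := kp.2.2
      let valor : Int :=
        if propia = "A" ∧ oponente = "A" then 0
        else if propia = "A" ∧ oponente = "C" then 1
        else if propia = "C" ∧ oponente = "A" then 2
        else 3
      indice + valor * (4 ^ k.toNat)) 0

-- ===== PORT B =====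
-- the module-level lookup table _DIGITO of Source B
def pvDigito : PySem.Dict (String × String) Int :=
  PySem.Dict.ofList [(("A", "A"), 0), (("A", "C"), 1), (("C", "A"), 2)]

def historia_a_indice_alt (historia : List (String × String)) : Int :=
  historia.reverse.foldl (fun indice par => 4 * indice + pvDigito.getD par 3) 0

-- ===== PRECONDITION & SPEC =====
def Spec_historia_a_indice (historia : List (String × String)) (out : Int) : Prop := out = historia_a_indice_alt historia
instance (historia : List (String × String)) (out : Int) : Decidable (Spec_historia_a_indice historia out) := by unfold Spec_historia_a_indice; infer_instance

-- ===== CLAIM (what is proved, stated in full; the proofs are below) =====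
def Claim_equal_historia_a_indice : Prop := ∀ (historia : List (String × String)), Dom_historia_a_indice historia → Spec_historia_a_indice historia (historia_a_indice historia)

-- ===== LEMMAS AND PROOFS =====

-- the digit of one (propia, oponente) pair, as A's branch chain writes it
def pvVal (p : String × String) : Int :=
  if p.1 = "A" ∧ p.2 = "A" then 0
  else if p.1 = "A" ∧ p.2 = "C" then 1
  else if p.1 = "C" ∧ p.2 = "A" then 2
  else 3

-- the least-significant-first base-4 value both programs compute
def pvSum : List (String × String) → Int
  | [] => 0
  | p :: ps => pvVal p + 4 * pvSum ps

-- B's table lookup computes the same digit as A's branch chain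
theorem pvDigito_getD (p : String × String) : pvDigito.getD p 3 = pvVal p := by
  have hlit : pvDigito = PySem.Dict.mk [(("A", "A"), 0), (("A", "C"), 1), (("C", "A"), 2)] := by
    decide
  obtain ⟨a, b⟩ := p
  rw [hlit]
  by_cases h1 : a = "A" ∧ b = "A"
  · obtain ⟨ha, hb⟩ := h1; subst ha; subst hb; decide
  by_cases h2 : a = "A" ∧ b = "C"
  · obtain ⟨ha, hb⟩ := h2; subst ha; subst hb; decide
  by_cases h3 : a = "C" ∧ b = "A"
  · obtain ⟨ha, hb⟩ := h3; subst ha; subst hb; decide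
  have n1 : (("A", "A") : String × String) ≠ (a, b) := by
    intro h; exact h1 ⟨(congrArg Prod.fst h).symm, (congrArg Prod.snd h).symm⟩
  have n2 : (("A", "C") : String × String) ≠ (a, b) := by
    intro h; exact h2 ⟨(congrArg Prod.fst h).symm, (congrArg Prod.snd h).symm⟩
  have n3 : (("C", "A") : String × String) ≠ (a, b) := by
    intro h; exact h3 ⟨(congrArg Prod.fst h).symm, (congrArg Prod.snd h).symm⟩
  simp [pvVal, PySem.Dict.getD, PySem.Dict.get?_mk_cons, PySem.Dict.get?,
    n1, n2, n3, h1, h2, h3]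

theorem pvA_fold (xs : List (String × String)) : ∀ (s : Int) (a : Int), 0 ≤ s →
    (PySem.List.enumerate xs s).foldl
      (fun indice kp =>
        indice + (if kp.2.1 = "A" ∧ kp.2.2 = "A" then (0:Int)
          else if kp.2.1 = "A" ∧ kp.2.2 = "C" then 1
          else if kp.2.1 = "C" ∧ kp.2.2 = "A" then 2
          else 3) * (4 ^ kp.1.toNat)) a
      = a + 4 ^ s.toNat * pvSum xs := by
  induction xs with
  | nil => intro s a _; simp [PySem.List.enumerate_nil, pvSum]
  | cons p ps ih =>
      intro s a hs
      rw [PySem.List.enumerate_cons, List.foldl_cons, ih (s+1) _ (by omega)]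
      have h1 : (s + 1).toNat = s.toNat + 1 := by omega
      simp only [pvSum, pvVal, h1, pow_succ]
      ring

theorem pvB_fold (xs : List (String × String)) : ∀ (a : Int),
    xs.reverse.foldl (fun indice par => 4 * indice + pvDigito.getD par 3) a
      = a * 4 ^ xs.length + pvSum xs := by
  induction xs with
  | nil => intro a; simp [pvSum]
  | cons p ps ih =>
      intro a
      rw [List.reverse_cons, List.foldl_append, ih a, List.foldl_cons, List.foldl_nil,
        pvDigito_getD]
      simp only [pvSum, List.length_cons, pow_succ]
      ring

-- ===== VERDICT (by name: the statement is the Claim_ definition above) =====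
theorem historia_a_indice_spec : Claim_equal_historia_a_indice := by
  intro historia _
  show historia_a_indice historia = historia_a_indice_alt historia
  unfold historia_a_indice historia_a_indice_alt
  rw [pvA_fold historia 0 0 le_rfl, pvB_fold historia 0]
  simp
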